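-- pv_equiv track=rewrite | github.com/ChoiKang4Ban/AlgorithmStudy | Yeom/튜플_카카오인턴쉽.py | solution
-- ===== SOURCE A (Python) =====
-- def solution(s):
--     answer = []
--     chk=[False]*(10**6+1)
--     s=parsing(s)
--     s.sort(key=lambda x:len(x))
--     for i in range(len(s)):
--         for j in range(len(s[i])):
--             if not chk[s[i][j]]:
--                 answer.append(s[i][j])
--                 chk[s[i][j]]=True;
--     return answer;
--
-- def parsing(line):
--     line=line[1:-1]
--     data=[]
--     tmpArr=[]
--     tmp=""
--     for l in line:
--         if l=='{':
--             tmpArr=[]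
--         elif l==',':
--             if len(tmp)!=0:
--                 tmpArr.append(int(tmp))
--                 tmp=''
--         elif l=='}':
--             if len(tmp)!=0:
--                 tmpArr.append(int(tmp))
--                 tmp=''
--             if len(tmpArr)!=0:
--                 data.append(tmpArr);
--         else:
--             tmp+=l;
--     return data;
-- ===== SOURCE B (Python) =====
-- # Same exact parsing pass as the original; the ordering stage is replaced:
-- # instead of comparison-sorting the sets by length and sweeping with a
-- # 10**6+1-entry boolean array, bucket the sets by length once, walk the
-- # lengths in increasing order (counting-sort style) and deduplicate with a
-- # hash set.
-- def _parse(line):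
--     line = line[1:-1]
--     data = []
--     tmpArr = []
--     tmp = ""
--     for l in line:
--         if l == '{':
--             tmpArr = []
--         elif l == ',':
--             if len(tmp) != 0:
--                 tmpArr.append(int(tmp))
--                 tmp = ''
--         elif l == '}':
--             if len(tmp) != 0:
--                 tmpArr.append(int(tmp))
--                 tmp = ''
--             if len(tmpArr) != 0:
--                 data.append(tmpArr)
--         else:
--             tmp += l
--     return data
--
--
-- def solution(s):
--     data = _parse(s)
--     buckets = {}
--     top = 0
--     for st in data:
--         buckets.setdefault(len(st), []).append(st)
--         if len(st) > top:
--             top = len(st)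
--     answer = []
--     seen = set()
--     for length in range(1, top + 1):
--         for st in buckets.get(length, []):
--             for e in st:
--                 if e not in seen:
--                     seen.add(e)
--                     answer.append(e)
--     return answer
-- ===== Notes on version B (the rewrite author's own statement) =====
-- stated objective: faster
-- what changed: Parsing is kept; the ordering stage replaces A's comparison sort of the sets by length plus a first-occurrence sweep over a freshly allocated 10^6+1-entry boolean flag array with a one-pass bucketing of the sets by length, an ascending walk over the lengths (counting-sort style) and a hash-set for first-occurrence deduplication, so the million-entry array allocation disappears from every call.
-- outside the precondition, e.g. on solution('{{-1},{-1,1000000}}'): A returns [-1], B returns [-1, 1000000]; on solution('{{1000001}}'): A raises IndexError, B returns [1000001]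
import Mathlib
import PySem

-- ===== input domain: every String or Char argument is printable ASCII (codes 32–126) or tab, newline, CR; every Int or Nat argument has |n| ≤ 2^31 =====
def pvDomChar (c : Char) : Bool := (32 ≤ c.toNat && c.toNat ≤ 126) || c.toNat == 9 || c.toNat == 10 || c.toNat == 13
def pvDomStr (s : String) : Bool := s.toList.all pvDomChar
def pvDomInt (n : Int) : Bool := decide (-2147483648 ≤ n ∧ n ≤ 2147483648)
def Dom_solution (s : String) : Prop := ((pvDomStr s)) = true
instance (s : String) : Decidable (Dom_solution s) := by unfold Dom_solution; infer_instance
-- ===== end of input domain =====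

-- B keeps A's exact parsing pass but replaces the ordering stage: instead of
-- comparison-sorting the sets by length and sweeping them with a 10^6+1-entry
-- boolean flag array, B buckets the sets by length in one pass, walks the
-- lengths in increasing order (counting-sort style) and deduplicates with a
-- hash set (so no 10^6-entry array is allocated per call).

-- ===== PORT A =====
-- Both Python files contain the SAME parsing helper (A's `parsing`, Source B's
-- `_parse`), so both ports share this transliteration of it.  Python's `data`
-- list can hold ALIASES of the live `tmpArr` object (data.append(tmpArr)
-- followed by tmpArr.append(...) mutates the appended entry); this is modelled
-- exactly: `pending` counts the trailing entries of `data` that alias the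
-- current `tmpArr`, and they are materialised (`List.replicate pending tmpArr`)
-- when `tmpArr` is rebound at '{' or at the end.  A failing int(tmp)
-- (ValueError, outside Pre_) is the `none` branch of PySem.Int.ofStr?.

def pvFlush (tmpArr : List Int) (tmp : List Char) : List Int × List Char :=
  if tmp = [] then (tmpArr, tmp)
  else
    match PySem.Int.ofStr? (String.ofList tmp) with
    | some v => (tmpArr ++ [v], [])
    | none => (tmpArr, [])

def pvParseRun : List Char → List (List Int) → Nat → List Int → List Char → List (List Int)
  | [], frozen, pending, tmpArr, _ => frozen ++ List.replicate pending tmpArr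
  | c :: cs, frozen, pending, tmpArr, tmp =>
    if c = '{' then
      pvParseRun cs (frozen ++ List.replicate pending tmpArr) 0 [] tmp
    else if c = ',' then
      let p := pvFlush tmpArr tmp
      pvParseRun cs frozen pending p.1 p.2
    else if c = '}' then
      let p := pvFlush tmpArr tmp
      if p.1 = [] then pvParseRun cs frozen pending p.1 p.2
      else pvParseRun cs frozen (pending + 1) p.1 p.2
    else
      pvParseRun cs frozen pending tmpArr (tmp ++ [c])

def parsing (s : String) : List (List Int) :=
  pvParseRun (PySem.List.slice s.toList (some 1) (some (-1))) [] 0 [] []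

def solution (s : String) : List Int :=
  let data := PySem.List.sorted (parsing s) (fun x => (x.length : Int)) false
  let chk : List Bool := List.replicate (10 ^ 6 + 1) false
  let res :=
    (PySem.List.pyRange 0 (data.length : Int) 1).foldl (fun st i =>
      let si := PySem.List.pyGetD data i []
      (PySem.List.pyRange 0 (si.length : Int) 1).foldl (fun st j =>
        let e := PySem.List.pyGetD si j 0
        match PySem.List.pyGet? st.2 e with
        | some b => if !b then (st.1 ++ [e], PySem.List.pySetD st.2 e true) else st
        | none => st) st) (([] : List Int), chk)
  res.1

def solution_alt (s : String) : List Int :=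
  let data := parsing s
  let bt :=
    data.foldl (fun (acc : PySem.Dict Int (List (List Int)) × Int) st =>
      (acc.1.insert (st.length : Int) (acc.1.getD (st.length : Int) [] ++ [st]),
       if (st.length : Int) > acc.2 then (st.length : Int) else acc.2))
      (PySem.Dict.empty, 0)
  let res :=
    (PySem.List.pyRange 1 (bt.2 + 1) 1).foldl (fun st L =>
      (bt.1.getD L []).foldl (fun st st' =>
        st'.foldl (fun st e =>
          if PySem.Set.contains st.2 e then st
          else (st.1 ++ [e], PySem.Set.add st.2 e)) st) st)
      (([] : List Int), PySem.Set.empty)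
  res.1

-- ===== PRECONDITION & SPEC =====
-- pvTok is a TOKENIZER, not the parser: it lists the number tokens int() is
-- applied to — the maximal runs of characters between ','/'}' delimiters
-- (with '{' characters skipped, and a trailing unterminated run dropped).

def pvTok : List Char → List Char → List (List Char)
  | _, [] => []
  | tmp, c :: cs =>
    if c = '{' then pvTok tmp cs
    else if c = ',' ∨ c = '}' then
      (if tmp = [] then pvTok [] cs else tmp :: pvTok [] cs)
    else pvTok (tmp ++ [c]) cs

def pvTokOK (t : List Char) : Bool :=
  match PySem.Int.ofStr? (String.ofList t) with
  | some v => decide (0 ≤ v ∧ v ≤ 10 ^ 6)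
  | none => false

-- Pre_ restricts to the task's natural domain: every number token parses as an
-- int in [0, 10^6].  Excluded (while both programs still raise or return):
-- tokens int() rejects (both raise ValueError); values above 10^6 or below
-- -(10^6+1), where A raises IndexError on its fixed-size flag array (B returns
-- the answer); and negative values, where A's chk[e] hits Python's
-- negative-index wraparound, an artefact that aliases -k with 10^6+1-k.

def Pre_solution (s : String) : Prop :=
  ∀ t ∈ pvTok [] (PySem.List.slice s.toList (some 1) (some (-1))), pvTokOK t = true
instance (s : String) : Decidable (Pre_solution s) := by unfold Pre_solution; infer_instance

def pvWitness_solution : String := "{{2},{2,1},{2,1,3}}"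


def Spec_solution (s : String) (out : List Int) : Prop := out = solution_alt s
instance (s : String) (out : List Int) : Decidable (Spec_solution s out) := by unfold Spec_solution; infer_instance

-- ===== CLAIM (what is proved, stated in full; the proofs are below) =====
def Claim_equal_solution : Prop := ∀ (s : String), Dom_solution s → Pre_solution s → Spec_solution s (solution s)

-- ===== LEMMAS AND PROOFS =====

def pvOK (e : Int) : Prop := 0 ≤ e ∧ e ≤ 10 ^ 6

theorem pv_filter_insertBy {α : Type} (key : α → Int) (L : Int) (x : α) :
    ∀ (l : List α), l.Pairwise (fun a b => key a ≤ key b) →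
      (PySem.List.insertBy (fun a b => decide (key a < key b)) x l).filter (fun y => key y == L) =
        l.filter (fun y => key y == L) ++ (if key x == L then [x] else []) := by
  intro l
  induction l with
  | nil => intro _; by_cases h : key x = L <;> simp [PySem.List.insertBy, List.filter, h]
  | cons y ys ih =>
    intro hp
    rw [List.pairwise_cons] at hp
    by_cases hlt : key x < key y
    · have h1 : (PySem.List.insertBy (fun a b => decide (key a < key b)) x (y :: ys)) = x :: y :: ys := by
        simp [PySem.List.insertBy, hlt]
      rw [h1]
      by_cases hx : key x = L
      · have hys : (y :: ys).filter (fun y => key y == L) = [] := by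
          rw [List.filter_eq_nil_iff]
          intro z hz
          have : key y ≤ key z := by
            rcases List.mem_cons.mp hz with h | h
            · subst h; exact le_refl _
            · exact hp.1 z h
          simp only [beq_iff_eq]
          omega
        simp [hys, hx]
      · have hxb : (key x == L) = false := by simp [hx]
        simp [List.filter_cons, hxb]
    · have h1 : (PySem.List.insertBy (fun a b => decide (key a < key b)) x (y :: ys)) =
          y :: PySem.List.insertBy (fun a b => decide (key a < key b)) x ys := by
        simp [PySem.List.insertBy, hlt]
      rw [h1, List.filter_cons, List.filter_cons, ih hp.2]
      by_cases hy : (key y == L) = true <;> simp [hy]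

-- S: sorted is stable: filtering by one key value is unchanged

theorem pv_filter_sorted {α : Type} (key : α → Int) (L : Int) (d : List α) :
    (PySem.List.sorted d key false).filter (fun y => key y == L) = d.filter (fun y => key y == L) := by
  induction d using List.reverseRecOn with
  | nil => simp
  | append_singleton d x ih =>
    have h1 : PySem.List.sorted (d ++ [x]) key false =
        PySem.List.insertBy (fun a b => decide (key a < key b)) x (PySem.List.sorted d key false) := by
      rw [PySem.List.sorted_eq_foldl_insertBy, PySem.List.sorted_eq_foldl_insertBy, List.foldl_append]
      simp
    rw [h1, pv_filter_insertBy key L x _ (PySem.List.sorted_pairwise d key), ih, List.filter_append]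
    by_cases hx : key x = L <;> simp [hx]

-- U: uniqueness of a stable sort

theorem pv_eq_of_perm_of_pairwise_of_filter {α : Type} (key : α → Int) :
    ∀ (l₁ l₂ : List α), l₁.Perm l₂ →
      l₁.Pairwise (fun a b => key a ≤ key b) → l₂.Pairwise (fun a b => key a ≤ key b) →
      (∀ L, l₁.filter (fun y => key y == L) = l₂.filter (fun y => key y == L)) →
      l₁ = l₂ := by
  intro l₁
  induction l₁ with
  | nil => intro l₂ hperm _ _ _; exact (hperm.nil_eq).symm ▸ rfl
  | cons a t₁ ih =>
    intro l₂ hperm hp₁ hp₂ hf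
    cases l₂ with
    | nil => exact absurd hperm.symm.nil_eq (by simp)
    | cons b t₂ =>
      have hab : b = a := by
        by_cases h : b = a
        · exact h
        · -- key a = key b, using filter at L := key a
          have hfa := hf (key a)
          rw [List.filter_cons, List.filter_cons] at hfa
          simp only [beq_self_eq_true, if_pos] at hfa
          have hbmem : b ∈ a :: t₁ := hperm.symm.subset (List.mem_cons_self ..)
          have hbt : b ∈ t₁ := by
            rcases List.mem_cons.mp hbmem with h' | h'
            · exact absurd h' h
            · exact h'
          have hamem : a ∈ b :: t₂ := hperm.subset (List.mem_cons_self ..)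
          have hat : a ∈ t₂ := by
            rcases List.mem_cons.mp hamem with h' | h'
            · exact absurd h'.symm h
            · exact h'
          have h1 : key a ≤ key b := (List.pairwise_cons.mp hp₁).1 b hbt
          have h2 : key b ≤ key a := (List.pairwise_cons.mp hp₂).1 a hat
          have hkey : key b = key a := le_antisymm h2 h1
          rw [hkey] at hfa
          simp at hfa
          -- hfa : a :: filter t₁ = b :: filter t₂ (both heads pass)
          exact hfa.1.symm
      subst hab
      have hperm' : t₁.Perm t₂ := hperm.cons_inv
      have heq : t₁ = t₂ := by
        apply ih t₂ hperm' (List.pairwise_cons.mp hp₁).2 (List.pairwise_cons.mp hp₂).2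
        intro L
        have := hf L
        rw [List.filter_cons, List.filter_cons] at this
        by_cases hL : (key b == L) = true
        · rw [if_pos hL, if_pos hL] at this
          exact (List.cons_eq_cons.mp this).2
        · rw [if_neg hL, if_neg hL] at this; exact this
      rw [heq]

-- PERM

theorem pv_flatMap_filter_perm {α : Type} (key : α → Int) :
    ∀ (Ls : List Int) (d : List α), Ls.Nodup → (∀ x ∈ d, key x ∈ Ls) →
      (Ls.flatMap fun L => d.filter (fun x => key x == L)).Perm d := by
  intro Ls
  induction Ls with
  | nil =>
    intro d _ hcov
    have : d = [] := by
      cases d with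
      | nil => rfl
      | cons x t => exact absurd (hcov x (List.mem_cons_self ..)) (by simp)
    simp [this]
  | cons L₀ Ls' ih =>
    intro d hnd hcov
    rw [List.flatMap_cons]
    have hrw : Ls'.flatMap (fun L => d.filter (fun x => key x == L)) =
        Ls'.flatMap (fun L => (d.filter (fun x => !(key x == L₀))).filter (fun x => key x == L)) := by
      apply List.flatMap_congr
      intro L hL
      rw [List.filter_filter]
      apply List.filter_congr
      intro x _
      by_cases h : key x = L
      · have : L ≠ L₀ := fun he => (List.nodup_cons.mp hnd).1 (he ▸ hL)
        simp [h, this]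
      · simp [h]
    rw [hrw]
    have hperm' := ih (d.filter (fun x => !(key x == L₀))) (List.nodup_cons.mp hnd).2 (by
      intro x hx
      rw [List.mem_filter] at hx
      have := hcov x hx.1
      rcases List.mem_cons.mp this with h | h
      · exact absurd h (by simpa using hx.2)
      · exact h)
    exact (hperm'.append_left (d.filter (fun x => key x == L₀))).trans (List.filter_append_perm _ d)

-- FILT

theorem pv_flatMap_filter_filter {α : Type} (key : α → Int) :
    ∀ (Ls : List Int) (d : List α), Ls.Nodup → (∀ x ∈ d, key x ∈ Ls) → ∀ L,
      (Ls.flatMap fun L' => d.filter (fun x => key x == L')).filter (fun x => key x == L) =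
        d.filter (fun x => key x == L) := by
  intro Ls
  induction Ls with
  | nil =>
    intro d _ hcov L
    have : d = [] := by
      cases d with
      | nil => rfl
      | cons x t => exact absurd (hcov x (List.mem_cons_self ..)) (by simp)
    simp [this]
  | cons L₀ Ls' ih =>
    intro d hnd hcov L
    rw [List.flatMap_cons, List.filter_append]
    have hrw : Ls'.flatMap (fun L' => d.filter (fun x => key x == L')) =
        Ls'.flatMap (fun L' => (d.filter (fun x => !(key x == L₀))).filter (fun x => key x == L')) := by
      apply List.flatMap_congr
      intro L' hL'
      rw [List.filter_filter]
      apply List.filter_congr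
      intro x _
      by_cases h : key x = L'
      · have : L' ≠ L₀ := fun he => (List.nodup_cons.mp hnd).1 (he ▸ hL')
        simp [h, this]
      · simp [h]
    rw [hrw, ih (d.filter (fun x => !(key x == L₀))) (List.nodup_cons.mp hnd).2 (by
      intro x hx
      rw [List.mem_filter] at hx
      rcases List.mem_cons.mp (hcov x hx.1) with h | h
      · exact absurd h (by simpa using hx.2)
      · exact h) L]
    rw [List.filter_filter, List.filter_filter]
    by_cases hLL : L = L₀
    · subst hLL
      have h1 : d.filter (fun x => decide (key x = L) && decide (key x = L)) = d.filter (fun x => key x == L) := by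
        apply List.filter_congr; intro x _; by_cases h : key x = L <;> simp [h]
      have h2 : d.filter (fun x => decide (key x = L) && !decide (key x = L)) = [] := by
        rw [List.filter_eq_nil_iff]; intro x _; by_cases h : key x = L <;> simp [h]
      have h1 : d.filter (fun x => key x == L && (key x == L)) = d.filter (fun x => key x == L) := by
        apply List.filter_congr; intro x _; by_cases h : key x = L <;> simp [h]
      have h2 : d.filter (fun x => key x == L && !(key x == L)) = [] := by
        rw [List.filter_eq_nil_iff]; intro x _; by_cases h : key x = L <;> simp [h]
      rw [h1, h2]; simp
    · have h1 : d.filter (fun x => key x == L && (key x == L₀)) = [] := by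
        rw [List.filter_eq_nil_iff]; intro x _
        by_cases h : key x = L <;> simp [h]
        intro h'; omega
      have h2 : d.filter (fun x => key x == L && !(key x == L₀)) = d.filter (fun x => key x == L) := by
        apply List.filter_congr; intro x _
        by_cases h : key x = L
        · simp [h]; omega
        · simp [h]
      rw [h1, h2]; simp

-- PW

theorem pv_pairwise_flatMap {α : Type} (key : α → Int) :
    ∀ (Ls : List Int) (d : List α), Ls.Pairwise (· < ·) →
      (Ls.flatMap fun L => d.filter (fun x => key x == L)).Pairwise (fun a b => key a ≤ key b) := by
  intro Ls
  induction Ls with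
  | nil => intro d _; simp
  | cons L₀ Ls' ih =>
    intro d hp
    rw [List.flatMap_cons, List.pairwise_append]
    refine ⟨?_, ih d (List.pairwise_cons.mp hp).2, ?_⟩
    · apply List.pairwise_of_forall_mem_list
      intro a ha b hb
      rw [List.mem_filter] at ha hb
      have h1 : key a = L₀ := by simpa using ha.2
      have h2 : key b = L₀ := by simpa using hb.2
      omega
    · intro a ha b hb
      rw [List.mem_filter] at ha
      rcases List.mem_flatMap.mp hb with ⟨L, hL, hbL⟩
      rw [List.mem_filter] at hbL
      have h1 : key a = L₀ := by simpa using ha.2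
      have h2 : key b = L := by simpa using hbL.2
      have h3 : L₀ < L := (List.pairwise_cons.mp hp).1 L hL
      omega


-- flush: ',' / '}' token flush

theorem pv_parse_facts :
    ∀ (cs : List Char) (frozen : List (List Int)) (pending : Nat) (tmpArr : List Int) (tmp : List Char),
      (∀ st ∈ frozen, st ≠ [] ∧ ∀ e ∈ st, pvOK e) →
      (pending > 0 → tmpArr ≠ []) →
      (∀ e ∈ tmpArr, pvOK e) →
      (∀ t ∈ pvTok tmp cs, pvTokOK t = true) →
      ∀ st ∈ pvParseRun cs frozen pending tmpArr tmp, st ≠ [] ∧ ∀ e ∈ st, pvOK e := by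
  intro cs
  induction cs with
  | nil =>
    intro frozen pending tmpArr tmp h1 h2 h3 _ st hst
    rw [pvParseRun] at hst
    rcases List.mem_append.mp hst with h | h
    · exact h1 st h
    · rcases List.eq_of_mem_replicate h with rfl
      have hp : pending > 0 := by
        by_contra hp
        simp [Nat.eq_zero_of_not_pos hp] at h
      exact ⟨h2 hp, h3⟩
  | cons c cs ih =>
    intro frozen pending tmpArr tmp h1 h2 h3 htok st hst
    rw [pvParseRun] at hst
    by_cases hc1 : c = '{'
    · rw [if_pos hc1] at hst
      refine ih _ 0 [] tmp ?_ (by simp) (by simp) ?_ st hst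
      · intro s hs
        rcases List.mem_append.mp hs with h | h
        · exact h1 s h
        · rcases List.eq_of_mem_replicate h with rfl
          have hp : pending > 0 := by
            by_contra hp
            simp [Nat.eq_zero_of_not_pos hp] at h
          exact ⟨h2 hp, h3⟩
      · intro t ht
        apply htok
        rw [pvTok, if_pos hc1]
        exact ht
    · -- flush facts (used by ',' and '}')
      by_cases hc2 : c = ','
      · rw [if_neg hc1, if_pos hc2] at hst
        by_cases htmp : tmp = []
        · subst htmp
          have hfl : pvFlush tmpArr [] = (tmpArr, []) := by rw [pvFlush, if_pos rfl]
          simp only [hfl] at hst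
          refine ih _ pending tmpArr [] h1 h2 h3 ?_ st hst
          intro t ht
          apply htok
          rw [pvTok, if_neg hc1, if_pos (Or.inl hc2), if_pos rfl]
          exact ht
        · have hok : pvTokOK tmp = true := by
            apply htok
            rw [pvTok, if_neg hc1, if_pos (Or.inl hc2), if_neg htmp]
            exact List.mem_cons_self ..
          rw [pvTokOK] at hok
          rcases hv : PySem.Int.ofStr? (String.ofList tmp) with _ | v
          · rw [hv] at hok; simp at hok
          · rw [hv] at hok
            have hbd : pvOK v := by simpa using of_decide_eq_true hok
            have hfl : pvFlush tmpArr tmp = (tmpArr ++ [v], []) := by rw [pvFlush, if_neg htmp, hv]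
            simp only [hfl] at hst
            refine ih _ pending (tmpArr ++ [v]) [] h1 (fun _ => by simp) ?_ ?_ st hst
            · intro e he
              rcases List.mem_append.mp he with h | h
              · exact h3 e h
              · rcases List.mem_singleton.mp h with rfl; exact hbd
            · intro t ht
              apply htok
              rw [pvTok, if_neg hc1, if_pos (Or.inl hc2), if_neg htmp]
              exact List.mem_cons_of_mem _ ht
      · by_cases hc3 : c = '}'
        · rw [if_neg hc1, if_neg hc2, if_pos hc3] at hst
          by_cases htmp : tmp = []
          · subst htmp
            have hfl : pvFlush tmpArr [] = (tmpArr, []) := by rw [pvFlush, if_pos rfl]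
            simp only [hfl] at hst
            have htok' : ∀ t ∈ pvTok ([] : List Char) cs, pvTokOK t = true := by
              intro t ht
              apply htok
              rw [pvTok, if_neg hc1, if_pos (Or.inr hc3), if_pos rfl]
              exact ht
            by_cases harr : tmpArr = []
            · rw [if_pos harr] at hst
              exact ih _ pending tmpArr [] h1 h2 h3 htok' st hst
            · rw [if_neg harr] at hst
              exact ih _ (pending + 1) tmpArr [] h1 (fun _ => harr) h3 htok' st hst
          · have hok : pvTokOK tmp = true := by
              apply htok
              rw [pvTok, if_neg hc1, if_pos (Or.inr hc3), if_neg htmp]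
              exact List.mem_cons_self ..
            rw [pvTokOK] at hok
            rcases hv : PySem.Int.ofStr? (String.ofList tmp) with _ | v
            · rw [hv] at hok; simp at hok
            · rw [hv] at hok
              have hbd : pvOK v := by simpa using of_decide_eq_true hok
              have hfl : pvFlush tmpArr tmp = (tmpArr ++ [v], []) := by rw [pvFlush, if_neg htmp, hv]
              simp only [hfl] at hst
              have h3' : ∀ e ∈ tmpArr ++ [v], pvOK e := by
                intro e he
                rcases List.mem_append.mp he with h | h
                · exact h3 e h
                · rcases List.mem_singleton.mp h with rfl; exact hbd
              have htok' : ∀ t ∈ pvTok ([] : List Char) cs, pvTokOK t = true := by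
                intro t ht
                apply htok
                rw [pvTok, if_neg hc1, if_pos (Or.inr hc3), if_neg htmp]
                exact List.mem_cons_of_mem _ ht
              rw [if_neg (by simp)] at hst
              exact ih _ (pending + 1) (tmpArr ++ [v]) [] h1 (fun _ => by simp) h3' htok' st hst
        · rw [if_neg hc1, if_neg hc2, if_neg hc3] at hst
          refine ih _ pending tmpArr (tmp ++ [c]) h1 h2 h3 ?_ st hst
          intro t ht
          apply htok
          rw [pvTok, if_neg hc1, if_neg (by simp [hc2, hc3]), ]
          exact ht

-- BUCK

theorem pv_buck (data : List (List Int)) (L : Int) :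
    (data.foldl (fun dd st => dd.insert (st.length : Int) (dd.getD (st.length : Int) [] ++ [st]))
        PySem.Dict.empty).getD L [] =
      data.filter (fun st => (st.length : Int) == L) := by
  have h := PySem.Dict.getD_foldl_modify_append
    (l := data.map (fun st => ((st.length : Int), st))) (d := PySem.Dict.empty) (c := L)
  rw [List.foldl_map] at h
  have h2 : (data.foldl (fun dd st => dd.insert (st.length : Int) (dd.getD (st.length : Int) [] ++ [st]))
      PySem.Dict.empty).getD L [] =
      (PySem.Dict.empty : PySem.Dict Int (List (List Int))).getD L [] ++
        ((data.map (fun st => ((st.length : Int), st))).filter (fun p => p.1 == L)).map (·.2) := h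
  rw [h2, List.filter_map, List.map_map]
  simp [Function.comp_def]

-- TOP

theorem pv_top_eq (data : List (List Int)) :
    data.foldl (fun acc st => if (st.length : Int) > acc then (st.length : Int) else acc) 0 =
      data.foldl (fun acc st => max acc (st.length : Int)) 0 := by
  apply PySem.List.foldl_congr_mem
  intro acc st _
  by_cases h : (st.length : Int) ≤ acc
  · rw [if_neg (by omega), max_eq_left h]
  · rw [if_pos (by omega), max_eq_right (by omega)]

-- SWEEP

theorem pv_sweep :
    ∀ (elems : List Int) (ansA : List Int) (chk : List Bool) (ansB : List Int) (seen : PySem.Set Int),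
      (∀ e ∈ elems, pvOK e) → chk.length = 10 ^ 6 + 1 →
      (∀ v : Int, pvOK v → PySem.List.pyGet? chk v = some (PySem.Set.contains seen v)) →
      ansA = ansB →
      (elems.foldl (fun st e =>
          match PySem.List.pyGet? st.2 e with
          | some b => if !b then (st.1 ++ [e], PySem.List.pySetD st.2 e true) else st
          | none => st) (ansA, chk)).1 =
        (elems.foldl (fun st e =>
          if PySem.Set.contains st.2 e then st
          else (st.1 ++ [e], PySem.Set.add st.2 e)) (ansB, seen)).1 := by
  intro elems
  induction elems with
  | nil => intro _ _ _ _ _ _ _ h; simpa using h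
  | cons e rest ih =>
    intro ansA chk ansB seen hok hlen hinv hans
    have hoke : pvOK e := hok e (List.mem_cons_self ..)
    rw [List.foldl_cons, List.foldl_cons]
    have hread : PySem.List.pyGet? chk e = some (PySem.Set.contains seen e) := hinv e hoke
    by_cases hc : PySem.Set.contains seen e = true
    · rw [hc] at hread
      have hcm : e ∈ seen := (PySem.Set.contains_iff ..).mp hc
      have hA : (match PySem.List.pyGet? (ansA, chk).2 e with
          | some b => if (!b) = true then ((ansA, chk).1 ++ [e], PySem.List.pySetD (ansA, chk).2 e true) else (ansA, chk)
          | none => (ansA, chk)) = (ansA, chk) := by simp [hread]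
      have hB : (if (ansB, seen).2.contains e = true then (ansB, seen)
          else ((ansB, seen).1 ++ [e], (ansB, seen).2.add e)) = (ansB, seen) := by simp [hcm]
      rw [hA, hB]
      exact ih _ _ _ _ (fun x hx => hok x (List.mem_cons_of_mem _ hx)) hlen hinv hans
    · rw [Bool.not_eq_true] at hc
      rw [hc] at hread
      have hcm : e ∉ seen := fun h => by
        rw [(PySem.Set.contains_iff ..).mpr h] at hc; exact Bool.true_eq_false.mp hc
      have hA : (match PySem.List.pyGet? (ansA, chk).2 e with
          | some b => if (!b) = true then ((ansA, chk).1 ++ [e], PySem.List.pySetD (ansA, chk).2 e true) else (ansA, chk)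
          | none => (ansA, chk)) = (ansA ++ [e], PySem.List.pySetD chk e true) := by
        simp [hread]
      have hB : (if (ansB, seen).2.contains e = true then (ansB, seen)
          else ((ansB, seen).1 ++ [e], (ansB, seen).2.add e)) = (ansB ++ [e], PySem.Set.add seen e) := by
        simp [hcm]
      rw [hA, hB]
      apply ih
      · exact fun x hx => hok x (List.mem_cons_of_mem _ hx)
      · rw [PySem.List.pySetD_of_nonneg _ _ hoke.1, List.length_set, hlen]
      · intro v hv
        rw [PySem.List.pySetD_of_nonneg _ _ hoke.1, PySem.List.pyGet?_of_nonneg _ hv.1,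
          List.getElem?_set]
        have hvlt : v.toNat < chk.length := by rcases hv with ⟨a, b⟩; omega
        have helt : e.toNat < chk.length := by rcases hoke with ⟨a, b⟩; omega
        by_cases hve : v = e
        · subst hve
          rw [if_pos rfl, if_pos hvlt]
          have hm : v ∈ PySem.Set.add seen v := (PySem.Set.mem_add ..).mpr (Or.inr rfl)
          rw [(PySem.Set.contains_iff ..).mpr hm]
        · have hne : e.toNat ≠ v.toNat := by
            intro h
            apply hve
            rcases hv with ⟨a, _⟩; rcases hoke with ⟨b, _⟩
            omega
          rw [if_neg hne]
          have hcv : PySem.Set.contains (PySem.Set.add seen e) v = PySem.Set.contains seen v := by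
            by_cases h : v ∈ seen
            · rw [(PySem.Set.contains_iff ..).mpr h,
                (PySem.Set.contains_iff ..).mpr ((PySem.Set.mem_add ..).mpr (Or.inl h))]
            · have h1 : PySem.Set.contains seen v = false := by
                rw [← Bool.not_eq_true]; intro hcon; exact h ((PySem.Set.contains_iff ..).mp hcon)
              have h2 : PySem.Set.contains (PySem.Set.add seen e) v = false := by
                rw [← Bool.not_eq_true]; intro hcon
                rcases (PySem.Set.mem_add ..).mp ((PySem.Set.contains_iff ..).mp hcon) with h' | h'
                · exact h h'
                · exact hve h'
              rw [h1, h2]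
          rw [hcv, ← PySem.List.pyGet?_of_nonneg _ hv.1]
          exact hinv v hv
      · rw [hans]

-- generic foldl over flatMap

theorem pv_foldl_flatMap {α β γ : Type} (Ls : List α) (g : α → List β) (f : γ → β → γ) :
    ∀ (init : γ), (Ls.flatMap g).foldl f init = Ls.foldl (fun acc L => (g L).foldl f acc) init := by
  induction Ls with
  | nil => intro init; simp
  | cons L Ls ih => intro init; rw [List.flatMap_cons, List.foldl_append, List.foldl_cons, ih]

theorem pv_sets_fold {γ : Type} (step : γ → Int → γ) :
    ∀ (dd : List (List Int)) (init : γ),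
      dd.foldl (fun st si => List.foldl (fun st j => step st (PySem.List.pyGetD si j 0)) st
        (PySem.List.pyRange 0 (si.length : Int) 1)) init = dd.flatten.foldl step init := by
  intro dd
  induction dd with
  | nil => intro init; simp
  | cons si dd ih =>
    intro init
    rw [List.foldl_cons, List.flatten_cons, List.foldl_append, ih,
      PySem.List.foldl_pyRange_zero_pyGetD' si 0 step init]

theorem pv_sets_fold' {γ : Type} (step : γ → Int → γ) :
    ∀ (dd : List (List Int)) (init : γ),
      dd.foldl (fun st si => si.foldl step st) init = dd.flatten.foldl step init := by
  intro dd
  induction dd with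
  | nil => intro init; simp
  | cons si dd ih => intro init; rw [List.foldl_cons, List.flatten_cons, List.foldl_append, ih]

theorem pv_main (s : String) (hpre : Pre_solution s) : solution s = solution_alt s := by
  simp only [solution, solution_alt]
  set d : List (List Int) := parsing s with hd
  -- parse facts
  have hfacts : ∀ st ∈ d, st ≠ [] ∧ ∀ e ∈ st, pvOK e := by
    rw [hd, parsing]
    exact pv_parse_facts _ [] 0 [] [] (by simp) (by simp) (by simp) hpre
  set key : List Int → Int := fun st => (st.length : Int) with hkey
  set T : Int := d.foldl (fun acc st => if (st.length : Int) > acc then (st.length : Int) else acc) 0 with hT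
  have hTmax : T = d.foldl (fun acc st => max acc (st.length : Int)) 0 := pv_top_eq d
  have hT0 : 0 ≤ T := by
    rw [hTmax]
    exact (PySem.List.le_foldl_max_int d (fun st => (st.length : Int)) 0).1
  have hTle : ∀ st ∈ d, (st.length : Int) ≤ T := by
    rw [hTmax]
    exact (PySem.List.le_foldl_max_int d (fun st => (st.length : Int)) 0).2
  set Ls : List Int := PySem.List.pyRange 1 (T + 1) 1 with hLs
  have hnodup : Ls.Nodup := PySem.List.nodup_pyRange_one ..
  have hcov : ∀ x ∈ d, key x ∈ Ls := by
    intro x hx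
    rw [hLs, PySem.List.mem_pyRange_one]
    have h1 := (hfacts x hx).1
    have h2 := hTle x hx
    constructor
    · have : 0 < x.length := List.length_pos_iff.mpr h1
      simp only [hkey]; omega
    · simp only [hkey]; omega
  set sortedD : List (List Int) := PySem.List.sorted d key false with hsorted
  set mid : List (List Int) := Ls.flatMap (fun L => d.filter (fun x => key x == L)) with hmid
  have heqmid : sortedD = mid := by
    apply pv_eq_of_perm_of_pairwise_of_filter key
    · exact (PySem.List.sorted_perm ..).trans (pv_flatMap_filter_perm key Ls d hnodup hcov).symm
    · exact PySem.List.sorted_pairwise d key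
    · exact pv_pairwise_flatMap key Ls d (PySem.List.pairwise_lt_pyRange_one ..)
    · intro L
      exact (pv_filter_sorted key L d).trans (pv_flatMap_filter_filter key Ls d hnodup hcov L).symm
  -- A side: collapse index loops to a fold over the flattened sets
  rw [PySem.List.foldl_pyRange_zero_pyGetD' sortedD []
    (fun st si => List.foldl
      (fun (st : List Int × List Bool) j =>
        match PySem.List.pyGet? st.2 (PySem.List.pyGetD si j 0) with
        | some b =>
          if (!b) = true then
            (st.1 ++ [PySem.List.pyGetD si j 0], PySem.List.pySetD st.2 (PySem.List.pyGetD si j 0) true)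
          else st
        | none => st)
      st (PySem.List.pyRange 0 (si.length : Int)))
    ([], List.replicate (10 ^ 6 + 1) false)]
  rw [pv_sets_fold (fun (st : List Int × List Bool) e =>
        match PySem.List.pyGet? st.2 e with
        | some b => if (!b) = true then (st.1 ++ [e], PySem.List.pySetD st.2 e true) else st
        | none => st) sortedD]
  -- B side: split the pair fold, name the buckets and the top
  rw [PySem.List.foldl_prod_mk
    (f := fun (acc : PySem.Dict Int (List (List Int))) (st : List Int) =>
      acc.insert (st.length : Int) (acc.getD (st.length : Int) [] ++ [st]))
    (g := fun (acc : Int) (st : List Int) =>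
      if (st.length : Int) > acc then (st.length : Int) else acc)]
  simp only [pv_buck]
  rw [← hT, ← hLs]
  rw [show (List.foldl (fun st L =>
      List.foldl (fun st st' =>
          List.foldl (fun (st : List Int × PySem.Set Int) e =>
            if st.2.contains e = true then st else (st.1 ++ [e], st.2.add e)) st st')
        st (List.filter (fun st => (st.length : Int) == L) d))
      ([], PySem.Set.empty) Ls) =
    (Ls.flatMap (fun L => List.filter (fun st => (st.length : Int) == L) d)).foldl
      (fun st st' => List.foldl (fun (st : List Int × PySem.Set Int) e =>
        if st.2.contains e = true then st else (st.1 ++ [e], st.2.add e)) st st')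
      ([], PySem.Set.empty)
    from (pv_foldl_flatMap ..).symm]
  rw [pv_sets_fold' (fun (st : List Int × PySem.Set Int) e =>
        if st.2.contains e = true then st else (st.1 ++ [e], st.2.add e))]
  rw [heqmid]
  -- both are sweeps over the same element list
  apply pv_sweep
  · intro e he
    rcases List.mem_flatten.mp he with ⟨st, hst, hest⟩
    rw [hmid] at hst
    rcases List.mem_flatMap.mp hst with ⟨L, _, hstL⟩
    exact (hfacts st (List.mem_filter.mp hstL).1).2 e hest
  · exact List.length_replicate
  · intro v hv
    rw [PySem.List.pyGet?_of_nonneg _ hv.1, List.getElem?_replicate, if_pos (by rcases hv with ⟨a,b⟩; omega)]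
    rfl
  · rfl

-- ===== VERDICT (by name: the statement is the Claim_ definition above) =====
theorem solution_spec : Claim_equal_solution := by
  intro s _ hpre
  unfold Spec_solution
  exact pv_main s hpre
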